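-- pv_equiv track=rewrite | github.com/Ericsson/PlantUML-Interactive-Editor | src/plantuml_gui/note.py | find_note_bounds
-- ===== SOURCE A (Python) =====
-- def find_note_bounds(lines, count):
--     note_start, note_end = -1, -1
--     index = 0
--     inside_note = False
--
--     while index < len(lines):
--         line = lines[index]
--         clean_line = line.strip()
--
--         if clean_line.startswith("note left") or clean_line.startswith("note right"):
--             if count == 1:
--                 note_start = index
--                 inside_note = True
--             count -= 1
--         if inside_note and clean_line.startswith("end note"):
--             note_end = index
--             break
--         index += 1
--     return note_start, note_end
-- ===== SOURCE B (Python) =====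
-- def find_note_bounds(lines, count):
--     starts = [i for i, line in enumerate(lines)
--               if line.strip().startswith(("note left", "note right"))]
--     if count < 1 or count > len(starts):
--         return -1, -1
--     note_start = starts[count - 1]
--     note_end = next((i for i in range(note_start, len(lines))
--                      if lines[i].strip().startswith("end note")), -1)
--     return note_start, note_end
-- ===== Notes on version B (the rewrite author's own statement) =====
-- stated objective: simpler
-- what changed: Replaces A's single stateful while-loop (mutating count, inside_note, break) by a two-phase decomposition: collect all note-start indices once, pick the count-th, then search forward for the first 'end note' line.
import Mathlib
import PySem

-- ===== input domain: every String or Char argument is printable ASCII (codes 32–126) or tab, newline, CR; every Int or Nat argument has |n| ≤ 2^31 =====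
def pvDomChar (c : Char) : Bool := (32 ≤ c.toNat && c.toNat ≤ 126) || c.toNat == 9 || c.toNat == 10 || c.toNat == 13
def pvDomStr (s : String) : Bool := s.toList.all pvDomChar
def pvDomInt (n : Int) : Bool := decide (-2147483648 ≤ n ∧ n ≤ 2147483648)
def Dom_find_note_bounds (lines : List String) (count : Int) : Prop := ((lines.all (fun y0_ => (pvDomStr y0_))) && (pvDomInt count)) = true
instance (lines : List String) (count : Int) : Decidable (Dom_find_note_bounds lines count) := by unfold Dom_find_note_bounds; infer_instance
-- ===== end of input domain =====

-- B replaces A's single stateful while-loop by a two-phase decomposition (collect note-start indices, pick the count-th, scan forward for 'end note'); objective: simpler.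


-- ===== PORT A =====
-- A's while loop; index, count, inside_note, note_start mutate in place and the loop breaks on the
-- first 'end note' once inside. The fuel argument (= iterations left, lines.length at entry) only
-- makes the recursion structural; it never runs out while index < lines.length.
def findNoteLoop (lines : List String) : Nat → Nat → Int → Bool → Int → Int → Int × Int
  | 0, _, _, _, ns, ne => (ns, ne)
  | fuel + 1, index, count, inside, ns, ne =>
    if h : index < lines.length then
      if PySem.Str.startswith (PySem.Str.strip lines[index]) "note left"
         || PySem.Str.startswith (PySem.Str.strip lines[index]) "note right" then
        if count == 1 then
          if PySem.Str.startswith (PySem.Str.strip lines[index]) "end note" then ((index : Int), (index : Int))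
          else findNoteLoop lines fuel (index + 1) (count - 1) true (index : Int) ne
        else
          if inside && PySem.Str.startswith (PySem.Str.strip lines[index]) "end note" then (ns, (index : Int))
          else findNoteLoop lines fuel (index + 1) (count - 1) inside ns ne
      else
        if inside && PySem.Str.startswith (PySem.Str.strip lines[index]) "end note" then (ns, (index : Int))
        else findNoteLoop lines fuel (index + 1) count inside ns ne
    else (ns, ne)

def find_note_bounds (lines : List String) (count : Int) : Int × Int :=
  findNoteLoop lines lines.length 0 count false (-1) (-1)

-- ===== PORT B =====
def isNoteStart (line : String) : Bool :=
  PySem.Str.startswith (PySem.Str.strip line) "note left"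
  || PySem.Str.startswith (PySem.Str.strip line) "note right"

-- the comprehension [i for i, line in enumerate(lines) if line.strip().startswith(...)]
def collectStarts : List String → Nat → List Nat
  | [], _ => []
  | l :: ls, i => if isNoteStart l then i :: collectStarts ls (i + 1) else collectStarts ls (i + 1)

-- next((i for i in range(start, len(lines)) if ...), -1); fuel = lines.length - start makes it structural
def findEnd (lines : List String) : Nat → Nat → Int
  | 0, _ => -1
  | fuel + 1, i =>
    if h : i < lines.length then
      if PySem.Str.startswith (PySem.Str.strip lines[i]) "end note" then (i : Int)
      else findEnd lines fuel (i + 1)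
    else -1

def find_note_bounds_alt (lines : List String) (count : Int) : Int × Int :=
  let starts := collectStarts lines 0
  if count < 1 ∨ count > (starts.length : Int) then (-1, -1)
  else
    let s := starts.getD (count - 1).toNat 0
    ((s : Int), findEnd lines (lines.length - s) s)

-- ===== PRECONDITION & SPEC =====
def Spec_find_note_bounds (lines : List String) (count : Int) (out : Int × Int) : Prop := out = find_note_bounds_alt lines count
instance (lines : List String) (count : Int) (out : Int × Int) : Decidable (Spec_find_note_bounds lines count out) := by unfold Spec_find_note_bounds; infer_instance

-- ===== CLAIM (what is proved, stated in full; the proofs are below) =====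
def Claim_equal_find_note_bounds : Prop := ∀ (lines : List String) (count : Int), Dom_find_note_bounds lines count → Spec_find_note_bounds lines count (find_note_bounds lines count)

-- ===== LEMMAS AND PROOFS =====

-- a stripped line that starts with "note left"/"note right" cannot also start with "end note"
lemma not_end_of_start (s : String)
    (h : (PySem.Str.startswith s "note left" || PySem.Str.startswith s "note right") = true) :
    PySem.Str.startswith s "end note" = false := by
  simp only [PySem.Str.startswith_eq] at *
  rcases Bool.or_eq_true_iff.mp h with h1 | h1 <;>
  · rw [PySem.Chars.startswith_iff] at h1
    by_contra hc
    rw [Bool.not_eq_false, PySem.Chars.startswith_iff] at hc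
    obtain ⟨t1, ht1⟩ := h1
    obtain ⟨t2, ht2⟩ := hc
    rw [← ht1] at ht2
    simp at ht2

-- B's computation restricted to the suffix of lines from position idx on
def altFrom (lines : List String) (idx : Nat) (count : Int) : Int × Int :=
  if count < 1 ∨ count > ((collectStarts (lines.drop idx) idx).length : Int) then (-1, -1)
  else
    (((collectStarts (lines.drop idx) idx).getD (count - 1).toNat 0 : Int),
      findEnd lines (lines.length - (collectStarts (lines.drop idx) idx).getD (count - 1).toNat 0)
        ((collectStarts (lines.drop idx) idx).getD (count - 1).toNat 0))

-- once inside a note with count ≤ 0, A's loop is exactly the forward 'end note' scan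
lemma loop_inside (lines : List String) (ns : Int) :
    ∀ fuel idx count, lines.length - idx ≤ fuel → count ≤ 0 →
      findNoteLoop lines fuel idx count true ns (-1)
        = (ns, findEnd lines (lines.length - idx) idx) := by
  intro fuel
  induction fuel with
  | zero =>
    intro idx count hle _
    rw [show lines.length - idx = 0 by omega]
    rw [findNoteLoop, findEnd]
  | succ n ih =>
    intro idx count hle hc
    by_cases h : idx < lines.length
    · have hc1 : ¬ ((count == 1) = true) := by simp; omega
      rw [show lines.length - idx = (lines.length - (idx + 1)) + 1 by omega]
      rw [findNoteLoop, findEnd, dif_pos h, dif_pos h, if_neg hc1]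
      simp only [Bool.true_and]
      by_cases he : PySem.Str.startswith (PySem.Str.strip lines[idx]) "end note" = true
      · rw [if_pos he, if_pos he, if_pos he, ite_self]
      · rw [if_neg he, if_neg he, if_neg he]
        by_cases hs : (PySem.Str.startswith (PySem.Str.strip lines[idx]) "note left"
            || PySem.Str.startswith (PySem.Str.strip lines[idx]) "note right") = true
        · rw [if_pos hs]
          exact ih (idx + 1) (count - 1) (by omega) (by omega)
        · rw [if_neg hs]
          exact ih (idx + 1) count (by omega) hc
    · rw [show lines.length - idx = 0 by omega]
      rw [findNoteLoop, findEnd, dif_neg h]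

lemma loop_eq_altFrom (lines : List String) :
    ∀ fuel idx count, lines.length - idx ≤ fuel →
      findNoteLoop lines fuel idx count false (-1) (-1) = altFrom lines idx count := by
  intro fuel
  induction fuel with
  | zero =>
    intro idx count hle
    have hd : lines.drop idx = [] := List.drop_eq_nil_of_le (by omega)
    rw [findNoteLoop, altFrom, hd]
    rw [if_pos (by simp [collectStarts]; omega)]
  | succ n ih =>
    intro idx count hle
    by_cases h : idx < lines.length
    · have hd : lines.drop idx = lines[idx] :: lines.drop (idx + 1) :=
        List.drop_eq_getElem_cons h
      by_cases hs : (PySem.Str.startswith (PySem.Str.strip lines[idx]) "note left"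
          || PySem.Str.startswith (PySem.Str.strip lines[idx]) "note right") = true
      · have he := not_end_of_start _ hs
        have he' : ¬ (PySem.Str.startswith (PySem.Str.strip lines[idx]) "end note" = true) := by
          rw [he]; simp
        have hcons : collectStarts (lines.drop idx) idx
            = idx :: collectStarts (lines.drop (idx + 1)) (idx + 1) := by
          rw [hd, collectStarts, if_pos (by simpa [isNoteStart] using hs)]
        by_cases hc1 : count = 1
        · subst hc1
          rw [findNoteLoop, dif_pos h, if_pos hs, if_pos (show ((1:Int) == 1) = true by rfl),
            if_neg he']
          rw [show (1:Int) - 1 = 0 by norm_num]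
          rw [loop_inside lines _ n (idx + 1) 0 (by omega) le_rfl]
          rw [altFrom, hcons]
          rw [if_neg (by rw [List.length_cons]; omega)]
          rw [show ((1:Int) - 1).toNat = 0 by norm_num, List.getD_cons_zero]
          have hfe : findEnd lines (lines.length - idx) idx
              = findEnd lines (lines.length - (idx + 1)) (idx + 1) := by
            rw [show lines.length - idx = (lines.length - (idx + 1)) + 1 by omega]
            rw [findEnd, dif_pos h, if_neg he']
          rw [hfe]
        · have hb : ¬ ((count == 1) = true) := by simp [hc1]
          rw [findNoteLoop, dif_pos h, if_pos hs, if_neg hb,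
            if_neg (show ¬ ((false && PySem.Str.startswith (PySem.Str.strip lines[idx]) "end note") = true) by simp)]
          rw [ih (idx + 1) (count - 1) (by omega)]
          rw [altFrom, altFrom, hcons]
          by_cases hcond : count - 1 < 1 ∨ count - 1 > ((collectStarts (lines.drop (idx + 1)) (idx + 1)).length : Int)
          · rw [if_pos hcond, if_pos (by rw [List.length_cons]; omega)]
          · rw [if_neg hcond, if_neg (by rw [List.length_cons]; omega)]
            have h2 : (2:Int) ≤ count := by omega
            rw [show (count - 1).toNat = (count - 1 - 1).toNat + 1 by omega]
            simp only [List.getD_cons_succ]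
      · have hs' : ¬ ((PySem.Str.startswith (PySem.Str.strip lines[idx]) "note left"
            || PySem.Str.startswith (PySem.Str.strip lines[idx]) "note right") = true) := hs
        have hcons : collectStarts (lines.drop idx) idx
            = collectStarts (lines.drop (idx + 1)) (idx + 1) := by
          rw [hd, collectStarts, if_neg (by simpa [isNoteStart] using hs)]
        rw [findNoteLoop, dif_pos h, if_neg hs',
          if_neg (show ¬ ((false && PySem.Str.startswith (PySem.Str.strip lines[idx]) "end note") = true) by simp)]
        rw [ih (idx + 1) count (by omega)]
        rw [altFrom, altFrom, hcons]
    · have hd : lines.drop idx = [] := List.drop_eq_nil_of_le (by omega)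
      rw [findNoteLoop, dif_neg h, altFrom, hd]
      rw [if_pos (by simp [collectStarts]; omega)]

-- ===== VERDICT (by name: the statement is the Claim_ definition above) =====
theorem find_note_bounds_spec : Claim_equal_find_note_bounds := by
  intro lines count _
  unfold Spec_find_note_bounds
  have := loop_eq_altFrom lines lines.length 0 count (by omega)
  simpa [find_note_bounds, find_note_bounds_alt, altFrom] using this
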